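-- pv_equiv track=rewrite | github.com/fionahiiwx/CITS1401 | Past Paper 2021 sem1.py | team_maker
-- ===== SOURCE A (Python) =====
-- def team_maker(pool1,pool2,pool3):
--     team_list = []
--     for i in range(len(pool1)):
--         for j in range(len(pool2)):
--             for k in range(len(pool3)):
--                 if len(pool1[i]) > 0 and len(pool2[j]) > 0 and len(pool3[k]) > 0:
--                     # Only team of 3 are formed
--                     team_list.append(pool1[i]+" "+pool2[j]+" "+pool3[k])
--     return team_list
-- ===== SOURCE B (Python) =====
-- def team_maker(pool1, pool2, pool3):
--     # Generic recursive k-way combiner: base case = the non-empty strings of the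
--     # last pool; each step prefixes every non-empty string of the head pool onto
--     # every combination of the remaining pools.
--     def combine(pools):
--         if len(pools) == 1:
--             return [s for s in pools[0] if s]
--         rest = combine(pools[1:])
--         return [s + " " + r for s in pools[0] if s for r in rest]
--     return combine([pool1, pool2, pool3])
-- ===== Notes on version B (the rewrite author's own statement) =====
-- stated objective: alternative
-- what changed: B replaces A's fused index-based triple loop with a generic recursive combiner over a list of pools: the base case yields the non-empty strings of the last pool and each recursive step prefixes each non-empty head-pool string onto every combination of the remaining pools.
import Mathlib
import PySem

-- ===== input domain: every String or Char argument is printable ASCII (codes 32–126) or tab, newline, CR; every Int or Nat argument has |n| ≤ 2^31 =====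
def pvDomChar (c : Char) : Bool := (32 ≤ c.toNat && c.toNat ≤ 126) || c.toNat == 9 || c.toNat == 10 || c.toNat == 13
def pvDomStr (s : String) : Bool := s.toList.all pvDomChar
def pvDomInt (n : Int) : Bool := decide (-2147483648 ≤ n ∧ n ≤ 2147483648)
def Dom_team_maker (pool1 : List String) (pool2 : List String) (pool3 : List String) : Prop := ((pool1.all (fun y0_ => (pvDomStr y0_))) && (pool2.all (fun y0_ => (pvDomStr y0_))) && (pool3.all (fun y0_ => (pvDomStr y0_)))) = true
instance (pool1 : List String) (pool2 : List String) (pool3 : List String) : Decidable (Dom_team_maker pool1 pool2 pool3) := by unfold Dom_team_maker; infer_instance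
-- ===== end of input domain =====

-- B replaces A's fused guarded triple index loop by a generic recursive combiner over a
-- list of pools (base case: non-empty strings of the last pool; step: prefix each
-- non-empty head string onto every combination of the rest); same return value
-- (neither version mutates its arguments).
-- ===== PORT A =====
def team_maker (pool1 : List String) (pool2 : List String) (pool3 : List String) : List String :=
  (PySem.List.pyRange 0 (PySem.List.len pool1) 1).foldl (fun team_list i =>
    (PySem.List.pyRange 0 (PySem.List.len pool2) 1).foldl (fun team_list j =>
      (PySem.List.pyRange 0 (PySem.List.len pool3) 1).foldl (fun team_list k =>
        if 0 < PySem.Str.len (PySem.List.pyGetD pool1 i "") ∧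
           0 < PySem.Str.len (PySem.List.pyGetD pool2 j "") ∧
           0 < PySem.Str.len (PySem.List.pyGetD pool3 k "") then
          team_list ++ [PySem.List.pyGetD pool1 i "" ++ " " ++ PySem.List.pyGetD pool2 j "" ++ " " ++ PySem.List.pyGetD pool3 k ""]
        else team_list) team_list) team_list) []

-- ===== PORT B =====
-- Source B's recursive helper 'combine'; the [] case is unreachable in B (combine is only
-- ever called with at least one pool) and is given the vacuous value [].
def pvCombine : List (List String) → List String
  | [] => []
  | [p] => p.filter (fun s => s != "")
  | p :: rest@(_ :: _) =>
      p.flatMap (fun s => if s != "" then (pvCombine rest).map (fun r => s ++ " " ++ r) else [])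

def team_maker_alt (pool1 : List String) (pool2 : List String) (pool3 : List String) : List String :=
  pvCombine [pool1, pool2, pool3]

-- ===== PRECONDITION & SPEC =====
def Spec_team_maker (pool1 : List String) (pool2 : List String) (pool3 : List String) (out : List String) : Prop := out = team_maker_alt pool1 pool2 pool3
instance (pool1 : List String) (pool2 : List String) (pool3 : List String) (out : List String) : Decidable (Spec_team_maker pool1 pool2 pool3 out) := by unfold Spec_team_maker; infer_instance

-- ===== CLAIM (what is proved, stated in full; the proofs are below) =====
def Claim_equal_team_maker : Prop := ∀ (pool1 : List String) (pool2 : List String) (pool3 : List String), Dom_team_maker pool1 pool2 pool3 → Spec_team_maker pool1 pool2 pool3 (team_maker pool1 pool2 pool3)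

-- ===== LEMMAS AND PROOFS =====

theorem pv_decide_len_pos (s : String) : decide (0 < PySem.Str.len s) = (s != "") := by
  have h : 0 < s.length ↔ ¬ s = "" := by
    rw [Nat.pos_iff_ne_zero, not_iff_not, String.length_eq_zero_iff]
  rw [Bool.eq_iff_iff]
  simp [PySem.Str.len, h]

-- A's triple index loop over range(len(...)) as a triple fold over the lists themselves
theorem pv_Anest (p1 p2 p3 : List String) : team_maker p1 p2 p3 =
    p1.foldl (fun a x => p2.foldl (fun a y => p3.foldl (fun a z =>
      if 0 < PySem.Str.len x ∧ 0 < PySem.Str.len y ∧ 0 < PySem.Str.len z then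
        a ++ [x ++ " " ++ y ++ " " ++ z] else a) a) a) [] := by
  unfold team_maker
  rw [PySem.List.foldl_pyRange_zero_pyGetD (xs := p1) (d := "") (init := ([] : List String))
    (f := fun a x =>
      (PySem.List.pyRange 0 (PySem.List.len p2) 1).foldl (fun a j =>
        (PySem.List.pyRange 0 (PySem.List.len p3) 1).foldl (fun a k =>
          if 0 < PySem.Str.len x ∧
             0 < PySem.Str.len (PySem.List.pyGetD p2 j "") ∧
             0 < PySem.Str.len (PySem.List.pyGetD p3 k "") then
            a ++ [x ++ " " ++ PySem.List.pyGetD p2 j "" ++ " " ++ PySem.List.pyGetD p3 k ""]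
          else a) a) a)]
  congr 1
  funext a x
  rw [PySem.List.foldl_pyRange_zero_pyGetD (xs := p2) (d := "") (init := a)
    (f := fun a y =>
      (PySem.List.pyRange 0 (PySem.List.len p3) 1).foldl (fun a k =>
        if 0 < PySem.Str.len x ∧ 0 < PySem.Str.len y ∧
           0 < PySem.Str.len (PySem.List.pyGetD p3 k "") then
          a ++ [x ++ " " ++ y ++ " " ++ PySem.List.pyGetD p3 k ""]
        else a) a)]
  congr 1
  funext a y
  rw [PySem.List.foldl_pyRange_zero_pyGetD (xs := p3) (d := "") (init := a)
    (f := fun a z =>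
      if 0 < PySem.Str.len x ∧ 0 < PySem.Str.len y ∧ 0 < PySem.Str.len z then
        a ++ [x ++ " " ++ y ++ " " ++ z] else a)]

-- the characterisation of B's recursive combiner on exactly three pools
theorem pv_B3 (p1 p2 p3 : List String) : team_maker_alt p1 p2 p3 =
    p1.flatMap (fun x => p2.flatMap (fun y =>
        (p3.filter (fun z => (x != "") && ((y != "") && (z != "")))).map
          (fun z => x ++ " " ++ y ++ " " ++ z))) := by
  unfold team_maker_alt
  simp only [pvCombine]
  congr 1
  funext x
  by_cases hx : (x != "") = true
  · simp only [hx, if_true, List.map_flatMap]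
    congr 1
    funext y
    by_cases hy : (y != "") = true
    · simp only [hy, if_true, Bool.true_and, List.map_map]
      have hcomp : ((fun r => x ++ " " ++ r) ∘ fun r => y ++ " " ++ r)
          = (fun z => x ++ " " ++ y ++ " " ++ z) := by
        funext z; simp [Function.comp, String.append_assoc]
      rw [hcomp]
    · simp only [Bool.not_eq_true] at hy
      simp [hy]
  · simp only [Bool.not_eq_true] at hx
    simp [hx]

theorem pv_key (p1 p2 p3 : List String) :
    p1.flatMap (fun x => p2.flatMap (fun y =>
        (p3.filter (fun z => (x != "") && ((y != "") && (z != "")))).map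
          (fun z => x ++ " " ++ y ++ " " ++ z)))
      = team_maker_alt p1 p2 p3 := (pv_B3 p1 p2 p3).symm

-- ===== VERDICT (by name: the statement is the Claim_ definition above) =====
theorem team_maker_spec : Claim_equal_team_maker := by
  intro pool1 pool2 pool3 _
  unfold Spec_team_maker
  rw [pv_Anest]
  simp only [PySem.List.foldl_append_ite, PySem.List.foldl_append_eq_flatMap,
    List.nil_append, Bool.decide_and, pv_decide_len_pos]
  exact pv_key pool1 pool2 pool3
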